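-- pv_equiv track=rewrite | github.com/nobody43/apparmor-suggest | aa_suggest.py | highlightSpecialChars
-- ===== SOURCE A (Python) =====
-- def colorize(string_, color, style='0'):
--     '''https://en.wikipedia.org/wiki/ANSI_escape_code#Colors
--     No nested colorization'''
--     colorTable = {
--         'Black':          '30', 'Bright Black':   '90',
--         'Red':            '31', 'Bright Red':     '91',
--         'Green':          '32', 'Bright Green':   '92',
--         'Yellow':         '33', 'Bright Yellow':  '93',
--         'Blue':           '34', 'Bright Blue':    '94',
--         'Magenta':        '35', 'Bright Magenta': '95',
--         'Cyan':           '36', 'Bright Cyan':    '96',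
--         'White':          '37', 'Bright White':   '97',
--     }
--
--     if not color in colorTable:
--         raise ValueError('Incorrect color specified: ' + color)
--
--     string_ = f'\033[{style};{colorTable[color]}m{string_}\033[0m'
--
--     return string_
--
-- def highlightSpecialChars(string_):
--     '''Better to apply after alignment'''
--     charsToColors = {
--         '=': 'Bright Blue',
--         '(': 'Cyan',
--         ')': 'Cyan',
--         '"': 'Cyan',
--         "'": 'Cyan',
--     }
--
--     for char,color in charsToColors.items():
--         if char in string_:
--             string_ = string_.replace(char, colorize(char, color))
--
--     return string_
-- ===== SOURCE B (Python) =====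
-- def _piece(c):
--     '''ANSI-highlighted form of a single character (plain char if not special)'''
--     if c == '=':
--         return '\033[0;94m' + c + '\033[0m'   # Bright Blue
--     if c == '(' or c == ')' or c == '"' or c == "'":
--         return '\033[0;36m' + c + '\033[0m'   # Cyan
--     return c
--
-- def highlightSpecialChars(string_):
--     '''Better to apply after alignment'''
--     parts = []
--     for c in string_:
--         parts.append(_piece(c))
--     return ''.join(parts)
-- ===== Notes on version B (the rewrite author's own statement) =====
-- stated objective: simpler
-- what changed: Replaced A's five sequential full-string str.replace passes (plus the colorize/colorTable machinery) with a single character-level loop that appends each character's pre-resolved ANSI-highlighted form and joins the pieces.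
import Mathlib
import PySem

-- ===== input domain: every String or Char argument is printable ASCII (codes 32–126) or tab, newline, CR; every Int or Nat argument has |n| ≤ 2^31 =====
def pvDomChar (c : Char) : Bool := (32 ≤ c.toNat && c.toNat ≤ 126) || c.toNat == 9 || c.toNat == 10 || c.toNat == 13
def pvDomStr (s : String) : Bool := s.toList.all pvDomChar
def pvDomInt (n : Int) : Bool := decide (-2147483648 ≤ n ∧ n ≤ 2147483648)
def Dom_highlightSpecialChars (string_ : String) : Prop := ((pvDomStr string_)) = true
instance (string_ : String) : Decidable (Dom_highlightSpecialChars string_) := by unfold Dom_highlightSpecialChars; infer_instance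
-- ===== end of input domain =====

-- B replaces A's five sequential full-string `str.replace` passes (and the colorize/colorTable
-- helper) with one character-level loop appending the pre-resolved ANSI form of each character
-- (objective: simpler; same output bytes).

-- ===== PORT A =====
-- A's helper: colorTable of colorize
def pvColorTable : PySem.Dict String String := PySem.Dict.ofList
  [("Black", "30"), ("Bright Black", "90"),
   ("Red", "31"), ("Bright Red", "91"),
   ("Green", "32"), ("Bright Green", "92"),
   ("Yellow", "33"), ("Bright Yellow", "93"),
   ("Blue", "34"), ("Bright Blue", "94"),
   ("Magenta", "35"), ("Bright Magenta", "95"),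
   ("Cyan", "36"), ("Bright Cyan", "96"),
   ("White", "37"), ("Bright White", "97")]

-- A's helper colorize; none = the ValueError branch
def colorize (string_ : String) (color : String) (style : String) : Option String :=
  if (pvColorTable.contains color) = false then none
  else some ("\x1b[" ++ style ++ ";" ++ pvColorTable.getD color "" ++ "m" ++ string_ ++ "\x1b[0m")

-- A's charsToColors dict literal
def pvCharsToColors : PySem.Dict String String := PySem.Dict.ofList
  [("=", "Bright Blue"), ("(", "Cyan"), (")", "Cyan"), ("\"", "Cyan"), ("'", "Cyan")]

-- A: for char,color in charsToColors.items(): if char in string_: string_ = string_.replace(char, colorize(char, color))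
-- (every colorize call here has its color in the table, so `.getD ""` never takes the ValueError branch)
def highlightSpecialChars (string_ : String) : String :=
  pvCharsToColors.items.foldl
    (fun s p => if PySem.Str.isIn p.1 s then PySem.Str.replace s p.1 ((colorize p.1 p.2 "0").getD "") else s)
    string_

-- ===== PORT B =====
-- B's helper _piece: the ANSI-highlighted form of one character (plain char if not special)
def pvPiece (c : Char) : String :=
  if c = '=' then
    String.ofList ("\x1b[0;94m".toList ++ [c] ++ "\x1b[0m".toList)
  else if c = '(' ∨ c = ')' ∨ c = '"' ∨ c = '\'' then
    String.ofList ("\x1b[0;36m".toList ++ [c] ++ "\x1b[0m".toList)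
  else
    String.ofList [c]

-- B: parts = []; for c in string_: parts.append(_piece(c)); return ''.join(parts)
def highlightSpecialChars_alt (string_ : String) : String :=
  PySem.Str.join "" (string_.toList.foldl (fun parts c => parts ++ [pvPiece c]) [])

-- ===== PRECONDITION & SPEC =====
def Spec_highlightSpecialChars (string_ : String) (out : String) : Prop := out = highlightSpecialChars_alt string_
instance (string_ : String) (out : String) : Decidable (Spec_highlightSpecialChars string_ out) := by unfold Spec_highlightSpecialChars; infer_instance

-- ===== CLAIM (what is proved, stated in full; the proofs are below) =====
def Claim_equal_highlightSpecialChars : Prop := ∀ (string_ : String), Dom_highlightSpecialChars string_ → Spec_highlightSpecialChars string_ (highlightSpecialChars string_)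

-- ===== LEMMAS AND PROOFS =====

theorem pv_go_single (c : Char) (r : List Char) :
    ∀ (fuel : Nat) (l acc : List Char), l.length ≤ fuel →
      PySem.Chars.replace.go [c] r fuel l acc
        = acc.reverse ++ l.flatMap (fun x => if x = c then r else [x]) := by
  intro fuel
  induction fuel with
  | zero =>
    intro l acc h
    have : l = [] := List.eq_nil_of_length_eq_zero (Nat.le_zero.mp h)
    subst this
    simp [PySem.Chars.replace.go]
  | succ n ih =>
    intro l acc h
    cases l with
    | nil => simp [PySem.Chars.replace.go]
    | cons a t =>
      have ht : t.length ≤ n := by simpa using h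
      by_cases hac : a = c
      · subst hac
        rw [PySem.Chars.replace.go]
        simp only [List.isPrefixOf_cons₂, List.isPrefixOf_nil_left, beq_self_eq_true,
          Bool.and_self, if_true, List.length_cons, List.length_nil, Nat.zero_add, List.drop_succ_cons, List.drop_zero]
        rw [ih t (r.reverse ++ acc) ht]
        simp [List.flatMap_cons]
      · rw [PySem.Chars.replace.go]
        have : [c].isPrefixOf (a :: t) = false := by
          simp [List.isPrefixOf_cons₂]; exact fun e => (hac e.symm).elim
        rw [this]
        simp only [Bool.false_eq_true, if_false]
        rw [ih t (a :: acc) ht]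
        simp [List.flatMap_cons, if_neg hac]

theorem pv_replace_single (s : List Char) (c : Char) (r : List Char) :
    PySem.Chars.replace s [c] r = s.flatMap (fun x => if x = c then r else [x]) := by
  rw [PySem.Chars.replace]
  simp only [List.isEmpty_cons, Bool.false_eq_true, if_false]
  simpa using pv_go_single c r s.length s [] le_rfl

theorem pv_mem_of_infix_single (c : Char) (t : List Char) : [c] <:+: t ↔ c ∈ t := by
  constructor
  · intro h; exact h.mem (by simp)
  · intro h
    obtain ⟨u, v, rfl⟩ := List.append_of_mem h
    exact ⟨u, v, by simp⟩

theorem pv_flatMap_id_of_not_mem (s : List Char) (c : Char) (r : List Char) (h : c ∉ s) :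
    s.flatMap (fun x => if x = c then r else [x]) = s := by
  induction s with
  | nil => rfl
  | cons a t ih =>
    simp only [List.mem_cons, not_or] at h
    simp [List.flatMap_cons, if_neg (fun e : a = c => h.1 e.symm), ih h.2]

theorem pv_step_eq (s : String) (c : Char) (r : String) :
    (if PySem.Str.isIn (String.ofList [c]) s then PySem.Str.replace s (String.ofList [c]) r else s).toList
      = s.toList.flatMap (fun x => if x = c then r.toList else [x]) := by
  split_ifs with h
  · rw [PySem.Str.toList_replace]
    simpa using pv_replace_single s.toList c r.toList
  · have h2 : PySem.Chars.isIn [c] s.toList = false := by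
      simpa using h
    have h3 : c ∉ s.toList := by
      intro hm
      rw [PySem.Chars.isIn_eq_false_iff] at h2
      exact h2 ((pv_mem_of_infix_single c s.toList).mpr hm)
    exact (pv_flatMap_id_of_not_mem s.toList c r.toList h3).symm

theorem pv_join_nil_flatten (l : List (List Char)) :
    PySem.Chars.join [] l = l.flatten := by
  induction l with
  | nil => simp [PySem.Chars.join_nil]
  | cons a t ih =>
    cases t with
    | nil => simp [PySem.Chars.join_singleton]
    | cons b u => rw [PySem.Chars.join_cons_cons, ih]; simp

-- per-char replacement of A's i-th pass
def pvRepl (c : Char) : List Char :=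
  ((colorize (String.ofList [c]) (pvCharsToColors.getD (String.ofList [c]) "") "0").getD "").toList

def pvG (c : Char) (x : Char) : List Char := if x = c then pvRepl c else [x]

theorem pv_foldl_append_map (f : Char → String) (l : List Char) :
    ∀ acc : List String, l.foldl (fun parts c => parts ++ [f c]) acc = acc ++ l.map f := by
  induction l with
  | nil => intro acc; simp
  | cons a t ih => intro acc; simp [List.foldl_cons, ih]

theorem pv_pointwise (x : Char) :
    ((((pvG '=' x).flatMap (pvG '(')).flatMap (pvG ')')).flatMap (pvG '"')).flatMap (pvG '\'')
      = (pvPiece x).toList := by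
  by_cases h1 : x = '='
  · subst h1; decide
  by_cases h2 : x = '('
  · subst h2; decide
  by_cases h3 : x = ')'
  · subst h3; decide
  by_cases h4 : x = '"'
  · subst h4; decide
  by_cases h5 : x = '\''
  · subst h5; decide
  have hp : pvPiece x = String.ofList [x] := by
    simp [pvPiece, if_neg h1, h2, h3, h4, h5]
  rw [hp]
  simp [pvG, if_neg h1, if_neg h2, if_neg h3, if_neg h4, if_neg h5]

theorem pv_main (s : String) : highlightSpecialChars s = highlightSpecialChars_alt s := by
  have hitems : pvCharsToColors.items
      = [("=", "Bright Blue"), ("(", "Cyan"), (")", "Cyan"), ("\"", "Cyan"), ("'", "Cyan")] := by decide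
  have hL : (highlightSpecialChars s).toList = s.toList.flatMap
      (fun x => (((pvG '=' x).flatMap (pvG '(')).flatMap (pvG ')')).flatMap (pvG '"') |>.flatMap (pvG '\'')) := by
    simp only [highlightSpecialChars, hitems, List.foldl_cons, List.foldl_nil]
    rw [show (("=":String) = String.ofList ['=']) from rfl,
        show (("(":String) = String.ofList ['(']) from rfl,
        show ((")":String) = String.ofList [')']) from rfl,
        show (("\"":String) = String.ofList ['"']) from rfl,
        show (("'":String) = String.ofList ['\'']) from rfl]
    rw [pv_step_eq, pv_step_eq, pv_step_eq, pv_step_eq, pv_step_eq]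
    simp only [List.flatMap_assoc]
    rfl
  have hR : (highlightSpecialChars_alt s).toList = s.toList.flatMap (fun c => (pvPiece c).toList) := by
    simp only [highlightSpecialChars_alt, pv_foldl_append_map, List.nil_append,
      PySem.Str.toList_join]
    rw [show ("" : String).toList = ([] : List Char) from rfl, pv_join_nil_flatten]
    rw [List.map_map, ← List.flatMap_def]
    rfl
  have : (highlightSpecialChars s).toList = (highlightSpecialChars_alt s).toList := by
    rw [hL, hR]
    exact List.flatMap_congr (fun x _ => pv_pointwise x)
  calc highlightSpecialChars s = String.ofList (highlightSpecialChars s).toList := by rw [String.ofList_toList]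
    _ = String.ofList (highlightSpecialChars_alt s).toList := by rw [this]
    _ = highlightSpecialChars_alt s := by rw [String.ofList_toList]

-- ===== VERDICT (by name: the statement is the Claim_ definition above) =====
theorem highlightSpecialChars_spec : Claim_equal_highlightSpecialChars := by
  intro string_ _
  unfold Spec_highlightSpecialChars
  exact pv_main string_
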